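-- pv_equiv track=rewrite | github.com/lqhuang/flight-rules | snippets/bench_page_iterator.py | paginate_slice_sentinel
-- ===== SOURCE A (Python) =====
-- import itertools
--
-- def paginate_slice_sentinel(iterable, page_size):
--     """Uses simple sliced iterator to yield pages"""
--     it = iter(iterable)
--     try:
--         while True:
--             batch = tuple(itertools.islice(it, page_size))
--             if batch == ():
--                 raise StopIteration
--             yield batch
--     except StopIteration:
--         return
-- ===== SOURCE B (Python) =====
-- def paginate_slice_sentinel(iterable, page_size):
--     """Yield tuples of page_size items by maintaining a running buffer."""
--     if page_size < 1:
--         return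
--     buf = []
--     for x in iterable:
--         buf.append(x)
--         if len(buf) == page_size:
--             yield tuple(buf)
--             buf = []
--     if buf:
--         yield tuple(buf)
-- ===== Notes on version B (the rewrite author's own statement) =====
-- stated objective: alternative
-- what changed: B traverses the iterable element-by-element with a running buffer that is flushed whenever it reaches page_size, instead of repeatedly slicing page_size items off an iterator with itertools.islice.
import Mathlib
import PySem

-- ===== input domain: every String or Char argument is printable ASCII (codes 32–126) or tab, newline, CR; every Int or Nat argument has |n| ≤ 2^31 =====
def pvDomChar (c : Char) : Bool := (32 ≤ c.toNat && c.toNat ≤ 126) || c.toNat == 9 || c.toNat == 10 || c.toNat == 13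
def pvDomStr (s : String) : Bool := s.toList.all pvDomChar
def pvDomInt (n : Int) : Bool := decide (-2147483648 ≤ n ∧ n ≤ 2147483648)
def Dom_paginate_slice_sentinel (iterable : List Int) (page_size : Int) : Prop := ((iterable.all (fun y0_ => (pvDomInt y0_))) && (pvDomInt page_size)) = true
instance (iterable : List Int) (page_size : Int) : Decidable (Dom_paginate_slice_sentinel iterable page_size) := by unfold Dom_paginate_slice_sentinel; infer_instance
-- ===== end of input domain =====

-- B replaces A's repeated islice slicing by an element-by-element running buffer (alternative decomposition, same cost).
-- Both versions are generators; equivalence is about the produced sequence of pages.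

-- ===== PORT A =====
-- A's while-loop: slice off the next page_size items; stop when the slice is empty.
-- (Pre_ restricts page_size ≥ 0: for negative page_size Python islice raises ValueError.)
def pagA_go (xs : List Int) (n : Nat) : List (List Int) :=
  let batch := xs.take n
  if h : batch = [] then [] else batch :: pagA_go (xs.drop n) n
termination_by xs.length
decreasing_by
  simp only [batch, List.take_eq_nil_iff, not_or] at h
  have h1 : n ≠ 0 := h.1
  have h2 : xs ≠ [] := h.2
  have h3 : 0 < xs.length := List.length_pos_of_ne_nil h2
  have h4 : (xs.drop n).length = xs.length - n := by simp
  omega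

def paginate_slice_sentinel (iterable : List Int) (page_size : Int) : List (List Int) :=
  pagA_go iterable page_size.toNat

-- ===== PORT B =====
-- Source B: guard page_size < 1, then one pass appending to buf, flushing at length page_size, final flush.
def pagB_go (xs : List Int) (n : Nat) (buf : List Int) : List (List Int) :=
  match xs with
  | [] => if buf = [] then [] else [buf]
  | x :: rest =>
    let buf' := buf ++ [x]
    if buf'.length = n then buf' :: pagB_go rest n [] else pagB_go rest n buf'

def paginate_slice_sentinel_alt (iterable : List Int) (page_size : Int) : List (List Int) :=
  if page_size < 1 then [] else pagB_go iterable page_size.toNat []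

-- ===== PRECONDITION & SPEC =====
-- Pre_ excludes negative page_size, on which Python A raises ValueError (islice rejects a negative stop).
def Pre_paginate_slice_sentinel (iterable : List Int) (page_size : Int) : Prop := 0 ≤ page_size
instance (iterable : List Int) (page_size : Int) : Decidable (Pre_paginate_slice_sentinel iterable page_size) := by unfold Pre_paginate_slice_sentinel; infer_instance
def pvWitness_paginate_slice_sentinel : List Int × Int := ([1, 2, 3, 4, 5], 2)

def Spec_paginate_slice_sentinel (iterable : List Int) (page_size : Int) (out : List (List Int)) : Prop := out = paginate_slice_sentinel_alt iterable page_size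
instance (iterable : List Int) (page_size : Int) (out : List (List Int)) : Decidable (Spec_paginate_slice_sentinel iterable page_size out) := by unfold Spec_paginate_slice_sentinel; infer_instance

-- ===== CLAIM (what is proved, stated in full; the proofs are below) =====
def Claim_equal_paginate_slice_sentinel : Prop := ∀ (iterable : List Int) (page_size : Int), Dom_paginate_slice_sentinel iterable page_size → Pre_paginate_slice_sentinel iterable page_size → Spec_paginate_slice_sentinel iterable page_size (paginate_slice_sentinel iterable page_size)

-- ===== LEMMAS AND PROOFS =====

-- Buffer invariant: running B's loop with a partial buffer equals A's slicing of buf ++ xs.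
theorem pagB_go_eq_pagA_go (n : Nat) (hn : 0 < n) :
    ∀ (xs buf : List Int), buf.length < n → pagB_go xs n buf = pagA_go (buf ++ xs) n := by
  intro xs
  induction xs with
  | nil =>
    intro buf hb
    simp only [List.append_nil]
    by_cases hbuf : buf = []
    · rw [pagA_go.eq_def]
      simp [pagB_go, hbuf]
    · have htake : buf.take n = buf := List.take_of_length_le (Nat.le_of_lt hb)
      have hdrop : buf.drop n = [] := List.drop_eq_nil_of_le (Nat.le_of_lt hb)
      rw [pagA_go.eq_def, pagA_go.eq_def]
      simp [pagB_go, hbuf, htake, hdrop]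
  | cons x rest ih =>
    intro buf hb
    simp only [pagB_go]
    have hlen : (buf ++ [x]).length = buf.length + 1 := by simp
    by_cases hfull : (buf ++ [x]).length = n
    · simp only [hfull, if_pos rfl]
      have hassoc : buf ++ x :: rest = (buf ++ [x]) ++ rest := by simp
      rw [hassoc, pagA_go.eq_def]
      have htake : ((buf ++ [x]) ++ rest).take n = buf ++ [x] := by
        rw [List.take_append_of_le_length (by omega)]
        exact List.take_of_length_le (by omega)
      have hdrop : ((buf ++ [x]) ++ rest).drop n = rest := by
        rw [List.drop_append_of_le_length (by omega)]
        simp [hfull]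
      have hne : buf ++ [x] ≠ [] := by simp
      simp only [htake, hdrop, dif_neg hne]
      rw [ih [] (by simpa using hn)]
      simp
    · simp only [hfull, if_neg hfull]
      rw [ih (buf ++ [x]) (by omega)]
      simp

-- ===== VERDICT (by name: the statement is the Claim_ definition above) =====
theorem paginate_slice_sentinel_spec : Claim_equal_paginate_slice_sentinel := by
  intro iterable page_size _ hpre
  unfold Pre_paginate_slice_sentinel at hpre
  unfold Spec_paginate_slice_sentinel paginate_slice_sentinel paginate_slice_sentinel_alt
  by_cases h0 : page_size < 1
  · have : page_size = 0 := by omega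
    subst this
    rw [if_pos h0, pagA_go.eq_def]
    simp
  · rw [if_neg h0]
    have hn : 0 < page_size.toNat := by omega
    rw [pagB_go_eq_pagA_go page_size.toNat hn iterable [] hn]
    simp
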